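-- pv_equiv track=rewrite | github.com/BellCordeiro/BellCordeiro | CriarNFT 3.py | tagacessorio
-- ===== SOURCE A (Python) =====
-- def tagacessorio(acessorio):
--
--     acessorio_colar=[1,2,3,8]
--     acessorio_coleira=[4,5,6, 16, 17, 18, 19, 20, 21, 22, 23, 24, 25, 26, 27, 28, 29, 30, 31, 32, 33, 34, 35, 36, 37, 38, 39, 40, 41, 42, 43, 44, 45, 46, 47, 48, 49, 50, 51]
--     acessorio_mascara=[7, 117, 118, 119, 120, 121, 122, 123, 124, 125, 126, 127, 128]
--     acessorio_nariz_palhaço=[9, 52, 53, 54, 55, 56, 57, 58, 59, 60, 61, 62, 63]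
--     acessorio_chifre=[10, 64, 65, 66, 67, 68, 69, 70, 71, 72, 73, 74, 75]
--     acessorio_corrente=[11, 76, 77, 78, 79, 80, 81, 82, 83, 84, 85, 86, 87]
--     acessorio_gravata_aberta=[12]
--     acessorio_gravata_semi_solta= [13, 88, 89, 90, 91, 92, 93, 94, 95, 96, 97, 98, 99]
--     acessorio_frozinha=[14, 100, 101, 102, 103, 104, 105, 106, 107, 108, 109, 110, 111]
--     acessorio_band_aid=[15, 112, 113, 114, 115, 116]
--
--     if(acessorio == '0'):
--         return ('Accessory : none')
--     for ac in acessorio_colar: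
--         if acessorio == str(ac):
--             return ('Accessory : necklace')
--     for ac in acessorio_coleira:
--         if acessorio == str(ac):
--             return ('Accessory : choker')
--     for ac in acessorio_mascara:
--         if acessorio == str(ac):
--             return ('Accessory : mask')
--     for ac in acessorio_nariz_palhaço:
--         if acessorio == str(ac):
--             return ('Accessory : clown nose')
--     for ac in acessorio_chifre:
--         if acessorio == str(ac):
--             return ('Accessory : horn')
--     for ac in acessorio_corrente:
--         if acessorio == str(ac):
--             return ('Accessory : chain')
--     for ac in acessorio_gravata_aberta:
--         if acessorio == str(ac):
--             return ('Accessory : loose tie')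
--     for ac in acessorio_gravata_semi_solta:
--         if acessorio == str(ac):
--             return ('Accessory : loose tie')
--     for ac in acessorio_frozinha:
--         if acessorio == str(ac):
--             return ('Accessory : piercing')
--     for ac in acessorio_band_aid:
--         if acessorio == str(ac):
--             return ('Accessory : bandaid')
--
--
--
--
--
--
--
--     return('Accessory : Não catalogado')
-- ===== SOURCE B (Python) =====
-- def tagacessorio(acessorio):
--     # Parse the id as an integer and classify it by numeric ranges instead of
--     # scanning lists of ids as strings.  Only canonical decimal strings match
--     # (str(n) == acessorio), exactly the strings A's str(ac) comparisons accept.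
--     try:
--         n = int(acessorio)
--     except (ValueError, TypeError):
--         return 'Accessory : Não catalogado'
--     if str(n) != acessorio or not (0 <= n <= 128):
--         return 'Accessory : Não catalogado'
--     if n < 16:
--         low = ['none', 'necklace', 'necklace', 'necklace',
--                'choker', 'choker', 'choker', 'mask',
--                'necklace', 'clown nose', 'horn', 'chain',
--                'loose tie', 'loose tie', 'piercing', 'bandaid']
--         lab = low[n]
--     elif n < 52:
--         lab = 'choker'
--     elif n < 117:
--         lab = ['clown nose', 'horn', 'chain',
--                'loose tie', 'piercing', 'bandaid'][(n - 52) // 12]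
--     else:
--         lab = 'mask'
--     return 'Accessory : ' + lab
-- ===== Notes on version B (the rewrite author's own statement) =====
-- stated objective: alternative
-- what changed: Instead of comparing the input string against str(id) for every id in ten hand-written lists, B parses the input once as an integer (accepting only its canonical decimal form) and classifies the number by arithmetic range tests plus a 12-wide bucket formula (n-52)//12, so no id list is scanned at all.
import Mathlib
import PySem

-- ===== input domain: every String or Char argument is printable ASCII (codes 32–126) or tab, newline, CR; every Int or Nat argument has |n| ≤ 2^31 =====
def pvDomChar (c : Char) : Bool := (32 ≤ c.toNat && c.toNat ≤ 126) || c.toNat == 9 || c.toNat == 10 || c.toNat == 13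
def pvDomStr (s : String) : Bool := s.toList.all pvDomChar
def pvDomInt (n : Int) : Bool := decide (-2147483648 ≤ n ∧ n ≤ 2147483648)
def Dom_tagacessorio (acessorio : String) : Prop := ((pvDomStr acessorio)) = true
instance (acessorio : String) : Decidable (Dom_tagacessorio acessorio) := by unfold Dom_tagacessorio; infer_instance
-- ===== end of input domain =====

-- B parses the id once as an integer (canonical decimal form only) and classifies it by
-- arithmetic range tests instead of scanning ten lists of ids as strings (objective: alternative).

-- ===== PORT A =====
-- each 'for ac in lst: if acessorio == str(ac): return lbl' loop, as structural recursion
def pvScan (aces : String) : List Int → Bool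
  | [] => false
  | ac :: rest => if aces = PySem.Int.toStr ac then true else pvScan aces rest

def tagacessorio (acessorio : String) : String :=
  let acessorio_colar : List Int := [1,2,3,8]
  let acessorio_coleira : List Int := [4,5,6, 16, 17, 18, 19, 20, 21, 22, 23, 24, 25, 26, 27, 28, 29, 30, 31, 32, 33, 34, 35, 36, 37, 38, 39, 40, 41, 42, 43, 44, 45, 46, 47, 48, 49, 50, 51]
  let acessorio_mascara : List Int := [7, 117, 118, 119, 120, 121, 122, 123, 124, 125, 126, 127, 128]
  let acessorio_nariz_palhaco : List Int := [9, 52, 53, 54, 55, 56, 57, 58, 59, 60, 61, 62, 63]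
  let acessorio_chifre : List Int := [10, 64, 65, 66, 67, 68, 69, 70, 71, 72, 73, 74, 75]
  let acessorio_corrente : List Int := [11, 76, 77, 78, 79, 80, 81, 82, 83, 84, 85, 86, 87]
  let acessorio_gravata_aberta : List Int := [12]
  let acessorio_gravata_semi_solta : List Int := [13, 88, 89, 90, 91, 92, 93, 94, 95, 96, 97, 98, 99]
  let acessorio_frozinha : List Int := [14, 100, 101, 102, 103, 104, 105, 106, 107, 108, 109, 110, 111]
  let acessorio_band_aid : List Int := [15, 112, 113, 114, 115, 116]
  if acessorio = "0" then "Accessory : none"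
  else if pvScan acessorio acessorio_colar then "Accessory : necklace"
  else if pvScan acessorio acessorio_coleira then "Accessory : choker"
  else if pvScan acessorio acessorio_mascara then "Accessory : mask"
  else if pvScan acessorio acessorio_nariz_palhaco then "Accessory : clown nose"
  else if pvScan acessorio acessorio_chifre then "Accessory : horn"
  else if pvScan acessorio acessorio_corrente then "Accessory : chain"
  else if pvScan acessorio acessorio_gravata_aberta then "Accessory : loose tie"
  else if pvScan acessorio acessorio_gravata_semi_solta then "Accessory : loose tie"
  else if pvScan acessorio acessorio_frozinha then "Accessory : piercing"
  else if pvScan acessorio acessorio_band_aid then "Accessory : bandaid"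
  else "Accessory : Não catalogado"

-- ===== PORT B =====
def pvLow : List String :=
  ["none", "necklace", "necklace", "necklace",
   "choker", "choker", "choker", "mask",
   "necklace", "clown nose", "horn", "chain",
   "loose tie", "loose tie", "piercing", "bandaid"]

def pvBuckets : List String := ["clown nose", "horn", "chain", "loose tie", "piercing", "bandaid"]

def tagacessorio_alt (acessorio : String) : String :=
  match PySem.Int.ofStr? acessorio with      -- int(acessorio); the except branch
  | none => "Accessory : Não catalogado"
  | some n =>
    if PySem.Int.toStr n ≠ acessorio ∨ ¬(0 ≤ n ∧ n ≤ 128) then "Accessory : Não catalogado"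
    else "Accessory : " ++
      (if n < 16 then (PySem.List.pyGet? pvLow n).getD ""   -- low[n]; index in range by the guard, so getD is never hit
       else if n < 52 then "choker"
       else if n < 117 then (PySem.List.pyGet? pvBuckets (PySem.Int.floordiv (n - 52) 12)).getD ""  -- [...][(n-52)//12]
       else "mask")

-- ===== PRECONDITION & SPEC =====
def Spec_tagacessorio (acessorio : String) (out : String) : Prop := out = tagacessorio_alt acessorio
instance (acessorio : String) (out : String) : Decidable (Spec_tagacessorio acessorio out) := by unfold Spec_tagacessorio; infer_instance

-- ===== CLAIM (what is proved, stated in full; the proofs are below) =====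
def Claim_equal_tagacessorio : Prop := ∀ (acessorio : String), Dom_tagacessorio acessorio → Spec_tagacessorio acessorio (tagacessorio acessorio)

-- ===== LEMMAS AND PROOFS =====

-- the canonical decimal strings of 0..128, the only inputs either program labels
def pvCanon : List String := (PySem.List.pyRange 0 129 1).map PySem.Int.toStr

theorem pvToStr_mem_canon (n : Int) (h0 : 0 ≤ n) (h1 : n < 129) :
    PySem.Int.toStr n ∈ pvCanon :=
  List.mem_map_of_mem (PySem.List.mem_pyRange_one.mpr ⟨h0, h1⟩)

-- on every canonical string the two ports agree (pure computation)
set_option maxRecDepth 100000 in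
theorem pvAgree_canon : ∀ n ∈ PySem.List.pyRange 0 129 1,
    tagacessorio (PySem.Int.toStr n) = tagacessorio_alt (PySem.Int.toStr n) := by decide

theorem pvScan_false (aces : String) (h : aces ∉ pvCanon) :
    ∀ l : List Int, (∀ i ∈ l, 0 ≤ i ∧ i < 129) → pvScan aces l = false := by
  intro l hl
  induction l with
  | nil => rfl
  | cons a t ih =>
      have ha := hl a (List.mem_cons_self ..)
      have hne : aces ≠ PySem.Int.toStr a := by
        intro he; exact h (he ▸ pvToStr_mem_canon a ha.1 ha.2)
      simp only [pvScan, if_neg hne]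
      exact ih (fun i hi => hl i (List.mem_cons_of_mem _ hi))

theorem pvA_default (aces : String) (h : aces ∉ pvCanon) :
    tagacessorio aces = "Accessory : Não catalogado" := by
  have h0 : aces ≠ "0" := by
    intro he
    exact h (he ▸ pvToStr_mem_canon 0 (by norm_num) (by norm_num))
  simp only [tagacessorio, if_neg h0]
  rw [pvScan_false aces h _ (by decide), pvScan_false aces h _ (by decide),
      pvScan_false aces h _ (by decide), pvScan_false aces h _ (by decide),
      pvScan_false aces h _ (by decide), pvScan_false aces h _ (by decide),
      pvScan_false aces h _ (by decide), pvScan_false aces h _ (by decide),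
      pvScan_false aces h _ (by decide), pvScan_false aces h _ (by decide)]
  rfl

theorem pvB_default (aces : String) (h : aces ∉ pvCanon) :
    tagacessorio_alt aces = "Accessory : Não catalogado" := by
  unfold tagacessorio_alt
  cases hp : PySem.Int.ofStr? aces with
  | none => rfl
  | some n =>
      have : PySem.Int.toStr n ≠ aces ∨ ¬(0 ≤ n ∧ n ≤ 128) := by
        by_contra hc
        push Not at hc
        obtain ⟨he, hb⟩ := hc
        exact h (he ▸ pvToStr_mem_canon n hb.1 (by omega))
      dsimp only
      rw [if_pos this]

-- ===== VERDICT (by name: the statement is the Claim_ definition above) =====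
theorem tagacessorio_spec : Claim_equal_tagacessorio := by
  intro aces _
  unfold Spec_tagacessorio
  by_cases h : aces ∈ pvCanon
  · obtain ⟨n, hn, he⟩ := List.mem_map.mp h
    rw [← he]
    exact pvAgree_canon n hn
  · rw [pvA_default aces h, pvB_default aces h]
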